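-- pv_equiv track=rewrite | github.com/sbigtree/PyArmor-Unpacker | methods/method 3/bypass.py | calculate_extended_args
-- ===== SOURCE A (Python) =====
-- def calculate_extended_args(arg: int): # This function will calculate the necessary extended_args needed
--     extended_args = []
--     new_arg = arg
--     if arg > 255:
--         extended_arg = arg >> 8
--         while True:
--             if extended_arg > 255:
--                 extended_arg -= 255
--                 extended_args.append(255)
--             else:
--                 extended_args.append(extended_arg)
--                 break
--
--         new_arg = arg % 256
--     return extended_args, new_arg
-- ===== SOURCE B (Python) =====
-- def calculate_extended_args(arg: int):
--     if arg <= 255: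
--         return [], arg
--     q = arg >> 8
--     count = (q - 1) // 255
--     return [255] * count + [q - 255 * count], arg % 256
-- ===== Notes on version B (the rewrite author's own statement) =====
-- stated objective: simpler
-- what changed: Replaces A's subtract-255-in-a-loop construction of extended_args with a closed-form count ((q-1)//255) and remainder, building the list with replication instead of iteration.
import Mathlib
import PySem

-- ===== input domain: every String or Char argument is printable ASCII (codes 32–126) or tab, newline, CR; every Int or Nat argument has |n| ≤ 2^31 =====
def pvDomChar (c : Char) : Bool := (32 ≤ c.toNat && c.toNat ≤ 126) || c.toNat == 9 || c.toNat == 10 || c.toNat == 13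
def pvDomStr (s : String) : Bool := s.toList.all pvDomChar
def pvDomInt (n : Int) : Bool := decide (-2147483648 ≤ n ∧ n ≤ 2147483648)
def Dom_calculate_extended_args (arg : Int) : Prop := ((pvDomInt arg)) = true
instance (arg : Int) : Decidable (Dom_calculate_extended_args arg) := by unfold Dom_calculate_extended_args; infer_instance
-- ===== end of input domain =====

-- B replaces A's subtract-255 loop by a closed-form count and remainder (simpler, list built by replication).


-- ===== PORT A =====
-- the 'while True' loop: subtract 255 while extended_arg > 255, appending 255 each time
def pvLoopA (acc : List Int) (e : Int) : List Int :=
  if e > 255 then pvLoopA (acc ++ [255]) (e - 255) else acc ++ [e]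
termination_by e.toNat
decreasing_by omega

def calculate_extended_args (arg : Int) : List Int × Int :=
  if arg > 255 then
    (pvLoopA [] (PySem.Int.floordiv arg 256), PySem.Int.mod arg 256)  -- arg >> 8 = arg // 256
  else ([], arg)

-- ===== PORT B =====
def calculate_extended_args_alt (arg : Int) : List Int × Int :=
  if arg ≤ 255 then ([], arg)
  else
    let q := PySem.Int.floordiv arg 256          -- arg >> 8
    let count := PySem.Int.floordiv (q - 1) 255
    (List.replicate count.toNat 255 ++ [q - 255 * count], PySem.Int.mod arg 256)

-- ===== PRECONDITION & SPEC =====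
def Spec_calculate_extended_args (arg : Int) (out : List Int × Int) : Prop := out = calculate_extended_args_alt arg
instance (arg : Int) (out : List Int × Int) : Decidable (Spec_calculate_extended_args arg out) := by unfold Spec_calculate_extended_args; infer_instance

-- ===== CLAIM (what is proved, stated in full; the proofs are below) =====
def Claim_equal_calculate_extended_args : Prop := ∀ (arg : Int), Dom_calculate_extended_args arg → Spec_calculate_extended_args arg (calculate_extended_args arg)

-- ===== LEMMAS AND PROOFS =====
-- Closed form of A's loop: for e ≥ 1 it appends (e-1)//255 copies of 255 and then the remainder.
lemma pvLoopA_closed : ∀ (n : Nat) (e : Int) (acc : List Int), e.toNat = n → 1 ≤ e →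
    pvLoopA acc e =
      acc ++ (List.replicate (PySem.Int.floordiv (e - 1) 255).toNat 255
              ++ [e - 255 * PySem.Int.floordiv (e - 1) 255]) := by
  intro n
  induction n using Nat.strong_induction_on with
  | _ n ih =>
    intro e acc hn he
    rw [pvLoopA]
    rw [PySem.Int.floordiv_eq_ediv_of_pos (a := e - 1) (by norm_num)]
    split_ifs with h
    · rw [ih (e - 255).toNat (by omega) (e - 255) _ rfl (by omega)]
      rw [PySem.Int.floordiv_eq_ediv_of_pos (a := e - 255 - 1) (by norm_num)]
      have hc : (e - 1) / 255 = (e - 255 - 1) / 255 + 1 := by omega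
      have hpos : 0 ≤ (e - 255 - 1) / 255 := by omega
      rw [hc]
      have ht : ((e - 255 - 1) / 255 + 1).toNat = ((e - 255 - 1) / 255).toNat + 1 := by omega
      rw [ht, List.replicate_succ]
      simp [List.append_assoc]
      ring_nf
    · have : (e - 1) / 255 = 0 := by omega
      simp [this]

theorem calculate_extended_args_spec : Claim_equal_calculate_extended_args := by
  intro arg _
  unfold Spec_calculate_extended_args calculate_extended_args calculate_extended_args_alt
  by_cases h : arg > 255
  · have h2 : ¬ arg ≤ 255 := by omega
    simp only [if_pos h, if_neg h2]
    have hq : 1 ≤ PySem.Int.floordiv arg 256 := by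
      rw [PySem.Int.floordiv_eq_ediv_of_pos (by norm_num)]; omega
    rw [pvLoopA_closed (PySem.Int.floordiv arg 256).toNat _ _ rfl hq]
    simp
  · simp only [if_neg h, if_pos (by omega : arg ≤ 255)]
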